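-- pv_equiv track=rewrite | github.com/MrBrantCode/unitest_baseline | mut_generate/mist_train_taco/taco_6591/solution.py | count_unique_leaves
-- ===== SOURCE A (Python) =====
-- def count_unique_leaves(n, leaves):
--     unique_leaves = {}
--     count = 0
--
--     for leaf in leaves:
--         species, color = leaf.split()
--         if species not in unique_leaves:
--             unique_leaves[species] = set()
--         if color not in unique_leaves[species]:
--             unique_leaves[species].add(color)
--             count += 1
--
--     return count
-- ===== SOURCE B (Python) =====
-- def _count_distinct(pairs):
--     if not pairs:
--         return 0
--     head, rest = pairs[0], pairs[1:]
--     return _count_distinct(rest) + (0 if head in rest else 1)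
--
--
-- def count_unique_leaves(n, leaves):
--     pairs = []
--     for leaf in leaves:
--         species, color = leaf.split()
--         pairs.append((species, color))
--     return _count_distinct(pairs)
-- ===== Notes on version B (the rewrite author's own statement) =====
-- stated objective: alternative
-- what changed: Drops the dict-of-sets and the running counter entirely: B first materialises the list of (species, color) pairs and then counts the distinct ones by structural recursion, counting each pair's last occurrence via a membership test in the remaining suffix (brute-force scan instead of hashed structures).
import Mathlib
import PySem

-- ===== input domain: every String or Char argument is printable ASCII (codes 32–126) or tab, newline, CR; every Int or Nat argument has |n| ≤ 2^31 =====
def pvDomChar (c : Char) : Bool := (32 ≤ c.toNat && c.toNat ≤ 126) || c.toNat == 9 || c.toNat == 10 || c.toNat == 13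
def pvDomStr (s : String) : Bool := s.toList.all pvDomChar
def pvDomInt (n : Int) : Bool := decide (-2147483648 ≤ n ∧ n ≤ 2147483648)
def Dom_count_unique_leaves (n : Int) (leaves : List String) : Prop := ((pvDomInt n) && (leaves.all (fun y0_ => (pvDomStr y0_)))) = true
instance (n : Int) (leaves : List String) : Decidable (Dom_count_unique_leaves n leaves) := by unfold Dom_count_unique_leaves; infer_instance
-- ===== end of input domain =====

-- B drops A's dict-of-sets and running counter: it builds the pair list and counts distinct
-- pairs by structural recursion (last-occurrence membership scan); alternative, not faster.

-- ===== PORT A =====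
-- one loop iteration of A: state = (dict species -> set of colors, count)
def cuStepA (st : PySem.Dict String (PySem.Set String) × Int) (leaf : String) :
    PySem.Dict String (PySem.Set String) × Int :=
  match PySem.Str.split₀ leaf with
  | [species, color] =>
    let d := if st.1.contains species then st.1 else st.1.insert species PySem.Set.empty
    if (d.getD species PySem.Set.empty).contains color then (d, st.2)
    else (d.insert species ((d.getD species PySem.Set.empty).add color), st.2 + 1)
  | _ => st  -- Python raises ValueError here (unpacking fails); excluded by Pre_

def count_unique_leaves (n : Int) (leaves : List String) : Int :=
  (leaves.foldl cuStepA (PySem.Dict.empty, 0)).2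

-- ===== PORT B =====
-- B's first loop: append the (species, color) pair of each leaf
def cuStepP (acc : List (String × String)) (leaf : String) : List (String × String) :=
  match PySem.Str.split₀ leaf with
  | [species, color] => acc ++ [(species, color)]
  | _ => acc  -- Python raises ValueError here; excluded by Pre_

-- B's helper _count_distinct: head/rest recursion, +1 when head does not reoccur in rest
def cuDistinct : List (String × String) → Int
  | [] => 0
  | head :: rest => cuDistinct rest + (if head ∈ rest then 0 else 1)

def count_unique_leaves_alt (n : Int) (leaves : List String) : Int :=
  cuDistinct (leaves.foldl cuStepP [])

-- ===== PRECONDITION & SPEC =====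
-- A (and B) raise ValueError when a leaf does not split into exactly two whitespace-separated tokens.
def Pre_count_unique_leaves (n : Int) (leaves : List String) : Prop :=
  ∀ leaf ∈ leaves, (PySem.Str.split₀ leaf).length = 2
instance (n : Int) (leaves : List String) : Decidable (Pre_count_unique_leaves n leaves) := by
  unfold Pre_count_unique_leaves; infer_instance

def pvWitness_count_unique_leaves : Int × List String :=
  (3, ["oak green", "maple red", "oak green"])

def Spec_count_unique_leaves (n : Int) (leaves : List String) (out : Int) : Prop := out = count_unique_leaves_alt n leaves
instance (n : Int) (leaves : List String) (out : Int) : Decidable (Spec_count_unique_leaves n leaves out) := by unfold Spec_count_unique_leaves; infer_instance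

-- ===== CLAIM (what is proved, stated in full; the proofs are below) =====
def Claim_equal_count_unique_leaves : Prop := ∀ (n : Int) (leaves : List String), Dom_count_unique_leaves n leaves → Pre_count_unique_leaves n leaves → Spec_count_unique_leaves n leaves (count_unique_leaves n leaves)

-- ===== LEMMAS AND PROOFS =====

-- proof-side intermediate: a flat set of pairs fed the same way A's loop is
def cuStepS (pairs : PySem.Set (String × String)) (leaf : String) : PySem.Set (String × String) :=
  match PySem.Str.split₀ leaf with
  | [species, color] => pairs.add (species, color)
  | _ => pairs

-- membership invariant between A's dict-of-sets and the flat pair set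
def cuMem (d : PySem.Dict String (PySem.Set String)) (s c : String) : Bool :=
  (d.getD s PySem.Set.empty).contains c

theorem cu_loop_eq (leaves : List String) (d : PySem.Dict String (PySem.Set String))
    (cnt : Int) (P : PySem.Set (String × String))
    (hmem : ∀ s c, cuMem d s c = true ↔ (s, c) ∈ P)
    (hcnt : cnt = PySem.Set.len P) :
    (leaves.foldl cuStepA (d, cnt)).2 = PySem.Set.len (leaves.foldl cuStepS P) := by
  induction leaves generalizing d cnt P with
  | nil => simpa using hcnt
  | cons leaf rest ih =>
    simp only [List.foldl_cons]
    rcases hsp : PySem.Str.split₀ leaf with _ | ⟨s, _ | ⟨c, _ | _⟩⟩ <;>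
      simp only [cuStepA, cuStepS, hsp] <;> try exact ih _ _ _ hmem hcnt
    -- the [s, c] case
    set d1 := if d.contains s then d else d.insert s PySem.Set.empty with hd1
    have hd1mem : ∀ s' c', cuMem d1 s' c' = true ↔ (s', c') ∈ P := by
      intro s' c'
      rw [← hmem s' c']
      unfold cuMem
      rw [hd1]
      split
      · rfl
      · rename_i hnc
        rw [PySem.Dict.getD_insert]
        split
        · rename_i he
          subst he
          rw [PySem.Dict.getD_of_not_contains (h := by simpa using hnc)]
        · rfl
    by_cases hc : (d1.getD s PySem.Set.empty).contains c = true
    · simp only [hc, if_true]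
      have hPmem : (s, c) ∈ P := (hd1mem s c).mp hc
      rw [PySem.Set.add_of_mem (h := hPmem)]
      exact ih _ _ _ hd1mem hcnt
    · rw [if_neg hc]
      have hPnot : (s, c) ∉ P := fun h => hc ((hd1mem s c).mpr h)
      rw [PySem.Set.add_of_not_mem (h := hPnot)]
      apply ih
      · intro s' c'
        unfold cuMem
        rw [PySem.Dict.getD_insert]
        split
        · rename_i he
          subst he
          have h := hd1mem s' c'
          unfold cuMem at h
          rw [PySem.Set.contains_iff] at h
          simp only [PySem.Set.contains_iff, PySem.Set.mem_add, List.mem_append,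
            List.mem_singleton, Prod.mk.injEq, true_and]
          tauto
        · rename_i hne
          have h := hd1mem s' c'
          unfold cuMem at h
          rw [h, List.mem_append]
          constructor
          · exact Or.inl
          · rintro (h | h)
            · exact h
            · simp at h; exact absurd h.1 hne
      · simp [PySem.Set.len, hcnt]

-- accumulator of B's pair-building loop factors out
theorem cuStepP_acc (leaves : List String) (acc : List (String × String)) :
    leaves.foldl cuStepP acc = acc ++ leaves.foldl cuStepP [] := by
  induction leaves generalizing acc with
  | nil => simp
  | cons leaf rest ih =>
    simp only [List.foldl_cons]
    rw [ih (cuStepP acc leaf), ih (cuStepP [] leaf)]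
    unfold cuStepP
    rcases PySem.Str.split₀ leaf with _ | ⟨s, _ | ⟨c, _ | _⟩⟩ <;> simp

-- feeding the flat set directly equals folding Set.add over B's pair list
theorem cuStepS_eq_add_pairs (leaves : List String) (P : PySem.Set (String × String)) :
    leaves.foldl cuStepS P = (leaves.foldl cuStepP []).foldl PySem.Set.add P := by
  induction leaves generalizing P with
  | nil => rfl
  | cons leaf rest ih =>
    simp only [List.foldl_cons]
    rw [ih, cuStepP_acc rest (cuStepP [] leaf), List.foldl_append]
    unfold cuStepS cuStepP
    rcases PySem.Str.split₀ leaf with _ | ⟨s, _ | ⟨c, _ | _⟩⟩ <;> simp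

-- folding Set.add keeps Nodup and collects exactly the members
theorem foldl_add_nodup_toFinset (L : List (String × String)) (P : PySem.Set (String × String))
    (hnd : P.Nodup) :
    (L.foldl PySem.Set.add P).Nodup ∧
      (L.foldl PySem.Set.add P).toFinset = P.toFinset ∪ L.toFinset := by
  induction L generalizing P with
  | nil => simpa using hnd
  | cons x rest ih =>
    simp only [List.foldl_cons]
    by_cases hx : x ∈ P
    · rw [PySem.Set.add_of_mem (h := hx)]
      obtain ⟨h1, h2⟩ := ih P hnd
      refine ⟨h1, ?_⟩
      rw [h2]
      ext y
      simp only [Finset.mem_union, List.mem_toFinset, List.toFinset_cons, Finset.mem_insert]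
      constructor
      · tauto
      · rintro (h | rfl | h)
        · exact Or.inl h
        · exact Or.inl hx
        · exact Or.inr h
    · rw [PySem.Set.add_of_not_mem (h := hx)]
      obtain ⟨h1, h2⟩ := ih (P ++ [x]) (by
        refine (List.nodup_append).mpr ⟨hnd, List.nodup_singleton x, ?_⟩
        intro a ha b hb
        simp only [List.mem_singleton] at hb
        subst hb
        exact fun he => hx (he ▸ ha)
        )
      refine ⟨h1, ?_⟩
      rw [h2]
      ext y
      simp [List.mem_toFinset, or_comm]

-- B's recursive counter computes the number of distinct elements
theorem cuDistinct_eq_card (L : List (String × String)) :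
    cuDistinct L = (L.toFinset.card : Int) := by
  induction L with
  | nil => simp [cuDistinct]
  | cons x rest ih =>
    rw [cuDistinct, ih, List.toFinset_cons]
    by_cases hx : x ∈ rest
    · rw [if_pos hx, Finset.insert_eq_self.mpr (List.mem_toFinset.mpr hx)]
      ring
    · rw [if_neg hx, Finset.card_insert_of_notMem (by simpa using hx)]
      push_cast
      ring

-- ===== VERDICT (by name: the statement is the Claim_ definition above) =====
theorem count_unique_leaves_spec : Claim_equal_count_unique_leaves := by
  intro n leaves _ _
  unfold Spec_count_unique_leaves count_unique_leaves count_unique_leaves_alt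
  rw [cu_loop_eq leaves PySem.Dict.empty 0 PySem.Set.empty
    (by intro s c; simp [cuMem, PySem.Dict.getD_empty, PySem.Set.empty, PySem.Set.contains])
    (by simp [PySem.Set.len, PySem.Set.empty])]
  rw [cuStepS_eq_add_pairs]
  obtain ⟨hnd, hfin⟩ := foldl_add_nodup_toFinset (leaves.foldl cuStepP []) PySem.Set.empty
    (by simp [PySem.Set.empty])
  rw [cuDistinct_eq_card, PySem.Set.len]
  have hcard := List.toFinset_card_of_nodup hnd
  rw [← hcard, hfin]
  simp [PySem.Set.empty]
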